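-- pv_equiv track=rewrite | github.com/aiur-adept/hhf | cut_candidate_analysis.py | unique_nonland_cards
-- ===== SOURCE A (Python) =====
-- def is_land(card_name, card_data):
--     entry = card_data.get(card_name, {})
--     return 'Land' in (entry.get('type_line', '') or '')
--
-- def unique_nonland_cards(deck, card_data):
--     """Return sorted list of unique non-land card names in the deck."""
--     seen = set()
--     result = []
--     for card in deck:
--         if card not in seen and not is_land(card, card_data):
--             seen.add(card)
--             result.append(card)
--     return sorted(result)
-- ===== SOURCE B (Python) =====
-- def is_land(card_name, card_data):
--     entry = card_data.get(card_name, {})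
--     return 'Land' in (entry.get('type_line', '') or '')
--
-- def unique_nonland_cards(deck, card_data):
--     """Return sorted list of unique non-land card names in the deck."""
--     out = []
--     prev = None
--     for name in sorted(deck):
--         if name != prev and not is_land(name, card_data):
--             out.append(name)
--         prev = name
--     return out
-- ===== Notes on version B (the rewrite author's own statement) =====
-- stated objective: alternative
-- what changed: Instead of maintaining a 'seen' hash set while scanning in input order and sorting the deduplicated result at the end, B sorts the deck first and makes one pass over the sorted names, collapsing consecutive duplicates by comparing each name with the previous one, filtering lands in the same pass; no auxiliary set is kept.
import Mathlib
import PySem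

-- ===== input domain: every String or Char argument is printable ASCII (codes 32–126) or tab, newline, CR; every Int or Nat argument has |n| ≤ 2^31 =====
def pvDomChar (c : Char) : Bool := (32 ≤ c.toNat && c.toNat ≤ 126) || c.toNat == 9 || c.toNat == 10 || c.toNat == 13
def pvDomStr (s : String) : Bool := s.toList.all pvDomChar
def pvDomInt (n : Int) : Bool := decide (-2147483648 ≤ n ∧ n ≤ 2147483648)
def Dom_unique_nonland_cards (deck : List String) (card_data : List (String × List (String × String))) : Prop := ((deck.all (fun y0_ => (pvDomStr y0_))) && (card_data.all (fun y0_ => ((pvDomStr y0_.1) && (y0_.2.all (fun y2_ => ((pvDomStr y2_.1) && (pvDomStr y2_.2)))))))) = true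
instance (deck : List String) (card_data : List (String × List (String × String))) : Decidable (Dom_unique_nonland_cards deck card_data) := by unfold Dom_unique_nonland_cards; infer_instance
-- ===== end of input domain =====

-- ===== PORT A =====
-- B changes the strategy, not the result: sort first, then one pass collapsing adjacent duplicates (no 'seen' set); same cost class.
def is_land (card_name : String) (card_data : List (String × List (String × String))) : Bool :=
  let entry := PySem.Dict.getD (PySem.Dict.mk card_data) card_name []
  -- `entry.get('type_line', '') or ''` equals the plain default lookup: the only falsy str is '' itself
  PySem.Str.isIn "Land" (PySem.Dict.getD (PySem.Dict.mk entry) "type_line" "")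

def unique_nonland_cards (deck : List String) (card_data : List (String × List (String × String))) : List String :=
  let st := deck.foldl (fun (st : PySem.Set String × List String) card =>
    if !(PySem.Set.contains st.1 card) && !(is_land card card_data) then
      (PySem.Set.add st.1 card, st.2 ++ [card])
    else st) (PySem.Set.empty, [])
  PySem.List.sorted st.2 (fun x => x)

-- ===== PORT B =====
def unique_nonland_cards_alt (deck : List String) (card_data : List (String × List (String × String))) : List String :=
  ((PySem.List.sorted deck (fun x => x)).foldl
    (fun (st : Option String × List String) name =>
      (some name,
       if !(st.1 == some name) && !(is_land name card_data) then st.2 ++ [name] else st.2))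
    (none, [])).2

-- ===== PRECONDITION & SPEC =====
def Spec_unique_nonland_cards (deck : List String) (card_data : List (String × List (String × String))) (out : List String) : Prop := out = unique_nonland_cards_alt deck card_data
instance (deck : List String) (card_data : List (String × List (String × String))) (out : List String) : Decidable (Spec_unique_nonland_cards deck card_data out) := by unfold Spec_unique_nonland_cards; infer_instance

-- ===== CLAIM (what is proved, stated in full; the proofs are below) =====
def Claim_equal_unique_nonland_cards : Prop := ∀ (deck : List String) (card_data : List (String × List (String × String))), Dom_unique_nonland_cards deck card_data → Spec_unique_nonland_cards deck card_data (unique_nonland_cards deck card_data)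

-- ===== LEMMAS AND PROOFS =====

-- A's loop keeps seen = result at every step
lemma A_state_eq (cd : List (String × List (String × String))) (deck : List String)
    (acc : List String) :
    deck.foldl (fun (st : PySem.Set String × List String) card =>
      if !(PySem.Set.contains st.1 card) && !(is_land card cd) then
        (PySem.Set.add st.1 card, st.2 ++ [card])
      else st) (acc, acc)
    = (let r := deck.foldl (fun r card =>
        if !(decide (card ∈ r)) && !(is_land card cd) then r ++ [card] else r) acc
       (r, r)) := by
  induction deck generalizing acc with
  | nil => simp
  | cons c d ih =>
    simp only [List.foldl_cons]
    rw [show PySem.Set.contains acc c = decide (c ∈ acc) from by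
      simp [PySem.Set.contains]]
    by_cases h : (!(decide (c ∈ acc)) && !(is_land c cd)) = true
    · simp only [if_pos h]
      have hadd : PySem.Set.add acc c = acc ++ [c] := by
        simp only [Bool.and_eq_true, Bool.not_eq_true'] at h
        simp [PySem.Set.add, PySem.Set.contains, h.1]
      rw [hadd]
      exact ih (acc ++ [c])
    · simp only [Bool.not_eq_true] at h
      simp only [h]
      exact ih acc

-- membership in A's accumulator loop
lemma A_mem (cd : List (String × List (String × String))) (deck : List String)
    (acc : List String) (x : String) :
    x ∈ deck.foldl (fun r card =>
        if !(decide (card ∈ r)) && !(is_land card cd) then r ++ [card] else r) acc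
    ↔ x ∈ acc ∨ (x ∈ deck ∧ is_land x cd = false) := by
  induction deck generalizing acc with
  | nil => simp
  | cons c d ih =>
    simp only [List.foldl_cons]
    by_cases h : (!(decide (c ∈ acc)) && !(is_land c cd)) = true
    · rw [if_pos h, ih]
      simp only [Bool.and_eq_true, Bool.not_eq_true', decide_eq_false_iff_not] at h
      constructor
      · rintro (hx | hx)
        · rcases List.mem_append.1 hx with hx | hx
          · exact Or.inl hx
          · simp only [List.mem_singleton] at hx
            subst hx; exact Or.inr ⟨List.mem_cons_self .., h.2⟩
        · exact Or.inr ⟨List.mem_cons_of_mem _ hx.1, hx.2⟩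
      · rintro (hx | ⟨hx, hpx⟩)
        · exact Or.inl (List.mem_append.2 (Or.inl hx))
        · rcases List.mem_cons.1 hx with rfl | hx
          · exact Or.inl (List.mem_append.2 (Or.inr (List.mem_singleton.2 rfl)))
          · exact Or.inr ⟨hx, hpx⟩
    · rw [if_neg h, ih]
      constructor
      · rintro (hx | hx)
        · exact Or.inl hx
        · exact Or.inr ⟨List.mem_cons_of_mem _ hx.1, hx.2⟩
      · rintro (hx | ⟨hx, hpx⟩)
        · exact Or.inl hx
        · rcases List.mem_cons.1 hx with rfl | hx
          · have : x ∈ acc := by by_contra hxa; exact h (by simp [hxa, hpx])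
            exact Or.inl this
          · exact Or.inr ⟨hx, hpx⟩

-- A's accumulator loop preserves Nodup
lemma A_nodup (cd : List (String × List (String × String))) (deck : List String)
    (acc : List String) (hacc : acc.Nodup) :
    (deck.foldl (fun r card =>
        if !(decide (card ∈ r)) && !(is_land card cd) then r ++ [card] else r) acc).Nodup := by
  induction deck generalizing acc with
  | nil => exact hacc
  | cons c d ih =>
    simp only [List.foldl_cons]
    by_cases h : (!(decide (c ∈ acc)) && !(is_land c cd)) = true
    · rw [if_pos h]
      refine ih _ ?_
      simp only [Bool.and_eq_true, Bool.not_eq_true', decide_eq_false_iff_not] at h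
      rw [List.nodup_append]
      refine ⟨hacc, List.nodup_singleton c, ?_⟩
      intro a ha b hb
      rw [List.mem_singleton] at hb
      subst hb
      exact fun he => h.1 (he ▸ ha)
    · simp only [Bool.not_eq_true] at h
      simp only [h]
      exact ih _ hacc

-- pure description of B's pass
def dFilt (cd : List (String × List (String × String))) : Option String → List String → List String
  | _, [] => []
  | prev, c :: cs =>
      (if !(prev == some c) && !(is_land c cd) then [c] else []) ++ dFilt cd (some c) cs

lemma B_foldl_eq_dFilt (cd : List (String × List (String × String))) (ys : List String)
    (prev : Option String) (out : List String) :
    (ys.foldl (fun (st : Option String × List String) name =>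
      (some name,
       if !(st.1 == some name) && !(is_land name cd) then st.2 ++ [name] else st.2))
      (prev, out)).2 = out ++ dFilt cd prev ys := by
  induction ys generalizing prev out with
  | nil => simp [dFilt]
  | cons c cs ih =>
    simp only [List.foldl_cons, dFilt]
    rw [ih]
    by_cases h : (!(prev == some c) && !(is_land c cd)) = true
    · simp [h]
    · simp only [Bool.not_eq_true] at h
      simp [h]

-- membership in B's pass, over a sorted tail bounded below by prev
lemma dFilt_mem (cd : List (String × List (String × String))) (ys : List String)
    (prev : Option String)
    (hs : ys.Pairwise (fun a b => a ≤ b))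
    (hb : ∀ q, prev = some q → ∀ y ∈ ys, q ≤ y) (x : String) :
    x ∈ dFilt cd prev ys ↔ x ∈ ys ∧ is_land x cd = false ∧ prev ≠ some x := by
  induction ys generalizing prev with
  | nil => simp [dFilt]
  | cons c cs ih =>
    have hcs : ∀ y ∈ cs, c ≤ y := fun y hy => (List.pairwise_cons.1 hs).1 y hy
    rw [dFilt]
    rw [List.mem_append]
    rw [ih (some c) (List.pairwise_cons.1 hs).2
      (fun q hq y hy => by injection hq with h; exact h ▸ hcs y hy)]
    constructor
    · rintro (hx | ⟨hx, hpx, hcx⟩)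
      · by_cases h : (!(prev == some c) && !(is_land c cd)) = true
        · rw [if_pos h, List.mem_singleton] at hx
          subst hx
          simp only [Bool.and_eq_true, Bool.not_eq_true'] at h
          refine ⟨List.mem_cons_self .., h.2, ?_⟩
          intro hpc; rw [hpc] at h; simp at h
        · simp only [Bool.not_eq_true] at h
          simp [h] at hx
      · refine ⟨List.mem_cons_of_mem _ hx, hpx, ?_⟩
        intro hpx'
        have hcx' : c ≤ x := hcs x hx
        have : ∀ y ∈ c :: cs, x ≤ y := fun y hy => hb x hpx' y hy
        have hxc : x ≤ c := this c (List.mem_cons_self ..)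
        exact hcx (by rw [le_antisymm hxc hcx'])
    · rintro ⟨hx, hpx, hprev⟩
      rcases List.mem_cons.1 hx with rfl | hx
      · left
        have : (!(prev == some x) && !(is_land x cd)) = true := by
          simp [hpx]
          intro h; exact hprev (by simp [h])
        simp [this]
      · by_cases hxc : x = c
        · subst hxc
          left
          have : (!(prev == some x) && !(is_land x cd)) = true := by
            simp [hpx]
            intro h; exact hprev (by simp [h])
          simp [this]
        · exact Or.inr ⟨hx, hpx, fun h => hxc (by cases h; rfl)⟩

-- B's pass is strictly increasing on a sorted input
lemma dFilt_pairwise (cd : List (String × List (String × String))) (ys : List String)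
    (prev : Option String)
    (hs : ys.Pairwise (fun a b => a ≤ b))
    (hb : ∀ q, prev = some q → ∀ y ∈ ys, q ≤ y) :
    (dFilt cd prev ys).Pairwise (fun a b => a < b) := by
  induction ys generalizing prev with
  | nil => simp [dFilt]
  | cons c cs ih =>
    have hcs : ∀ y ∈ cs, c ≤ y := fun y hy => (List.pairwise_cons.1 hs).1 y hy
    have hcs' : cs.Pairwise (fun a b => a ≤ b) := (List.pairwise_cons.1 hs).2
    have htail := ih (some c) hcs'
      (fun q hq y hy => by injection hq with h; exact h ▸ hcs y hy)
    have hmem : ∀ x ∈ dFilt cd (some c) cs, c < x := by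
      intro x hx
      rw [dFilt_mem cd cs (some c) hcs'
        (fun q hq y hy => by injection hq with h; exact h ▸ hcs y hy)] at hx
      rcases hx with ⟨hx, _, hne⟩
      exact lt_of_le_of_ne (hcs x hx) (fun h => hne (by rw [h]))
    rw [dFilt]
    by_cases h : (!(prev == some c) && !(is_land c cd)) = true
    · rw [if_pos h, List.singleton_append]
      exact List.pairwise_cons.2 ⟨hmem, htail⟩
    · simp only [Bool.not_eq_true] at h
      simpa [h] using htail

-- ===== VERDICT (by name: the statement is the Claim_ definition above) =====
theorem unique_nonland_cards_spec : Claim_equal_unique_nonland_cards := by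
  intro deck cd _
  unfold Spec_unique_nonland_cards unique_nonland_cards unique_nonland_cards_alt
  have hA := A_state_eq cd deck []
  simp only [PySem.Set.empty] at hA ⊢
  rw [hA]
  set r := deck.foldl (fun r card =>
    if !(decide (card ∈ r)) && !(is_land card cd) then r ++ [card] else r) [] with hr
  set B := (PySem.List.sorted deck (fun x => x)).foldl
      (fun (st : Option String × List String) name =>
        (some name,
         if !(st.1 == some name) && !(is_land name cd) then st.2 ++ [name] else st.2))
      (none, []) with hB
  have hsorted : (PySem.List.sorted deck (fun x => x)).Pairwise (fun a b => a ≤ b) :=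
    PySem.List.sorted_pairwise deck (fun x => x)
  have hbnd : ∀ q, (none : Option String) = some q → ∀ y ∈ PySem.List.sorted deck (fun x => x), q ≤ y := by
    intro q hq; cases hq
  have hB2 : B.2 = dFilt cd none (PySem.List.sorted deck (fun x => x)) := by
    rw [hB, B_foldl_eq_dFilt]; simp
  have hBmem : ∀ x, x ∈ B.2 ↔ x ∈ deck ∧ is_land x cd = false := by
    intro x
    rw [hB2, dFilt_mem cd _ none hsorted hbnd]
    simp [PySem.List.mem_sorted]
  have hBpair : B.2.Pairwise (fun a b => a < b) := by
    rw [hB2]; exact dFilt_pairwise cd _ none hsorted hbnd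
  have hrmem : ∀ x, x ∈ r ↔ x ∈ deck ∧ is_land x cd = false := by
    intro x; rw [hr, A_mem]; simp
  have hrnodup : r.Nodup := A_nodup cd deck [] List.nodup_nil
  have hperm : B.2.Perm r := by
    rw [List.perm_ext_iff_of_nodup hBpair.nodup hrnodup]
    intro x; rw [hBmem, hrmem]
  exact PySem.List.sorted_eq_of_perm_of_pairwise_lt r B.2 (fun x => x) hperm hBpair
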